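-- pv_equiv track=rewrite | github.com/hisakatha/snhic-dequeker | lib/coolerAnalysisShared.py | map_chromnames
-- ===== SOURCE A (Python) =====
-- def map_chromnames(chromnames, ref_chromnames):
--     a = list()
--
--     for ref_chromname in ref_chromnames:
--         for chromname in chromnames:
--             if chromname[-1 * min(len(chromname), len(ref_chromname)):].lower() == ref_chromname[-1 * min(len(chromname), len(ref_chromname)):].lower():
--                 a.append((chromname, ref_chromname))
--                 break
--
--     return a
-- ===== SOURCE B (Python) =====
-- def map_chromnames(chromnames, ref_chromnames):
--     # Index chromnames once: first index per lowercased full name, and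
--     # first index per nonempty lowercased suffix; then answer each ref
--     # by dictionary lookups instead of rescanning chromnames.
--     full_idx = {}   # lowercased chromname -> first index with that name
--     suf_idx = {}    # nonempty lowercased suffix -> first index having it
--     for i, c in enumerate(chromnames):
--         cl = c.lower()
--         if cl not in full_idx:
--             full_idx[cl] = i
--         for k in range(len(cl)):
--             s = cl[k:]
--             if s not in suf_idx:
--                 suf_idx[s] = i
--
--     a = []
--     for r in ref_chromnames:
--         rl = r.lower()
--         if rl == "":
--             best = full_idx.get("")
--         else:
--             best = suf_idx.get(rl)
--             for k in range(len(rl)):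
--                 j = full_idx.get(rl[k:])
--                 if j is not None and (best is None or j < best):
--                     best = j
--         if best is not None:
--             a.append((chromnames[best], r))
--     return a
-- ===== Notes on version B (the rewrite author's own statement) =====
-- stated objective: faster
-- what changed: Instead of rescanning all chromnames for every ref_chromname with a slice-and-lower comparison, B builds two dictionaries once over chromnames (first index per lowercased name and per nonempty lowercased suffix) and answers each ref_chromname by dictionary lookups over its suffixes, taking the smallest matching index.
import Mathlib
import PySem

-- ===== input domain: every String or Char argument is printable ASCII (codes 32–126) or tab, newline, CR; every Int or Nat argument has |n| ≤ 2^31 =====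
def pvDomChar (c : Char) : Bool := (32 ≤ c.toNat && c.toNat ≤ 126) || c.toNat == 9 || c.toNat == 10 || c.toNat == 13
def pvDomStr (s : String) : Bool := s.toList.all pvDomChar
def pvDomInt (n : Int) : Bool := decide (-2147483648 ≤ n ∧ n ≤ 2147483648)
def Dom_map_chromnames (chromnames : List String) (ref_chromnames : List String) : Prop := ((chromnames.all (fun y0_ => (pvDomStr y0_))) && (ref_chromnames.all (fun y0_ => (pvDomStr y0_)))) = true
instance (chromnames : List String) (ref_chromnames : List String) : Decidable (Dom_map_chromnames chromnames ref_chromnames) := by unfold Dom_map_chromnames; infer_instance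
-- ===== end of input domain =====

-- B replaces A's rescan of all chromnames for every reference name by two dictionaries built
-- once over chromnames (first index per lowercased name / per nonempty lowercased suffix),
-- answering each reference name by dictionary lookups; objective: faster.

-- ===== PORT A =====
-- the slice-and-lower comparison of A's `if`
def pvMatchA (c r : String) : Bool :=
  PySem.Str.lower (PySem.Str.slice c (some (-1 * min (PySem.Str.len c) (PySem.Str.len r))) none)
    == PySem.Str.lower (PySem.Str.slice r (some (-1 * min (PySem.Str.len c) (PySem.Str.len r))) none)

-- A's inner `for … break` loop: first chromname matching ref_chromname
def pvFindA : List String → String → Option String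
  | [], _ => none
  | c :: rest, r => if pvMatchA c r then some c else pvFindA rest r

def map_chromnames (chromnames : List String) (ref_chromnames : List String) : List (String × String) :=
  ref_chromnames.foldl
    (fun a r =>
      match pvFindA chromnames r with
      | some c => a ++ [(c, r)]
      | none => a)
    []

-- ===== PORT B =====
-- inner loop `for k in range(len(cl)): … suf_idx[cl[k:]] = i` (first write wins)
def pvAddSuffixes (sd : PySem.Dict String Int) (i : Int) (cl : String) : PySem.Dict String Int :=
  (PySem.List.pyRange 0 (PySem.Str.len cl) 1).foldl
    (fun d k =>
      let s := PySem.Str.slice cl (some k) none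
      if d.contains s then d else d.insert s i)
    sd

-- body of B's `for i, c in enumerate(chromnames)` loop
def pvBuildStep (fs : PySem.Dict String Int × PySem.Dict String Int) (p : Int × String) :
    PySem.Dict String Int × PySem.Dict String Int :=
  let cl := PySem.Str.lower p.2
  ((if fs.1.contains cl then fs.1 else fs.1.insert cl p.1), pvAddSuffixes fs.2 p.1 cl)

-- (full_idx, suf_idx) after B's index-building loop
def pvBuild (chromnames : List String) : PySem.Dict String Int × PySem.Dict String Int :=
  (PySem.List.enumerate chromnames 0).foldl pvBuildStep (PySem.Dict.empty, PySem.Dict.empty)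

-- `if j is not None and (best is None or j < best): best = j`
def pvOmin (best j? : Option Int) : Option Int :=
  match j? with
  | none => best
  | some j =>
    match best with
    | none => some j
    | some b => some (if j < b then j else b)

-- B's lookup loop for one reference name: smallest matching chromname index, if any
def pvBest (fd sd : PySem.Dict String Int) (r : String) : Option Int :=
  let rl := PySem.Str.lower r
  if rl == "" then fd.get? ""
  else
    (PySem.List.pyRange 0 (PySem.Str.len rl) 1).foldl
      (fun best k => pvOmin best (fd.get? (PySem.Str.slice rl (some k) none)))
      (sd.get? rl)

def map_chromnames_alt (chromnames : List String) (ref_chromnames : List String) : List (String × String) :=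
  let ds := pvBuild chromnames
  ref_chromnames.foldl
    (fun a r =>
      match pvBest ds.1 ds.2 r with
      | some b => a ++ [(PySem.List.pyGetD chromnames b "", r)]
      | none => a)
    []

-- ===== PRECONDITION & SPEC =====
def Spec_map_chromnames (chromnames : List String) (ref_chromnames : List String) (out : List (String × String)) : Prop := out = map_chromnames_alt chromnames ref_chromnames
instance (chromnames : List String) (ref_chromnames : List String) (out : List (String × String)) : Decidable (Spec_map_chromnames chromnames ref_chromnames out) := by unfold Spec_map_chromnames; infer_instance

-- ===== CLAIM (what is proved, stated in full; the proofs are below) =====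
def Claim_equal_map_chromnames : Prop := ∀ (chromnames : List String) (ref_chromnames : List String), Dom_map_chromnames chromnames ref_chromnames → Spec_map_chromnames chromnames ref_chromnames (map_chromnames chromnames ref_chromnames)

-- ===== LEMMAS AND PROOFS =====

-- `s` is a nonempty suffix of `cl` (exactly the keys suf_idx receives from chromname `cl`)
def pvQ (s cl : String) : Bool := decide (s.toList ≠ [] ∧ s.toList <:+ cl.toList)

lemma pvGet_condFold (l : List Int) (f : Int → String) (i : Int)
    (sd : PySem.Dict String Int) (s : String) :
    (l.foldl (fun d k => if d.contains (f k) then d else d.insert (f k) i) sd).get? s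
      = match sd.get? s with
        | some v => some v
        | none => if s ∈ l.map f then some i else none := by
  induction l generalizing sd with
  | nil => cases h : sd.get? s <;> simp [h]
  | cons a t ih =>
    simp only [List.foldl_cons]
    by_cases hc : sd.contains (f a) = true
    · rw [if_pos hc, ih]
      by_cases hs : s = f a
      · have : (sd.get? s).isSome := by
          rw [← PySem.Dict.contains_eq_isSome_get?, hs]; exact hc
        obtain ⟨v, hv⟩ := Option.isSome_iff_exists.mp this
        simp [hv]
      · cases h : sd.get? s <;> simp [List.mem_cons, hs]
    · rw [if_neg hc, ih]
      have hnone : sd.get? (f a) = none := by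
        rw [← Option.not_isSome_iff_eq_none, ← PySem.Dict.contains_eq_isSome_get?]
        exact hc
      by_cases hs : s = f a
      · rw [hs, PySem.Dict.get?_insert_self, hnone]
        simp
      · rw [PySem.Dict.get?_insert_of_ne _ _ hs]
        cases h : sd.get? s <;> simp [List.mem_cons, hs]

lemma pvMem_sufKeys (cl s : String) :
    s ∈ (PySem.List.pyRange 0 (PySem.Str.len cl) 1).map
        (fun k => PySem.Str.slice cl (some k) none) ↔ pvQ s cl = true := by
  simp only [List.mem_map, PySem.List.mem_pyRange_one, pvQ, decide_eq_true_eq]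
  constructor
  · rintro ⟨k, ⟨h0, hk⟩, rfl⟩
    rw [PySem.Str.len_eq] at hk
    have hts : (PySem.Str.slice cl (some k) none).toList = cl.toList.drop k.toNat := by
      simp [PySem.List.slice_from _ h0]
    constructor
    · rw [hts, Ne, List.drop_eq_nil_iff]
      omega
    · rw [hts]; exact List.drop_suffix _ _
  · rintro ⟨hne, t, ht⟩
    have hlen : t.length + s.toList.length = cl.toList.length := by
      rw [← ht]; simp
    have hs0 : 0 < s.toList.length := List.length_pos_of_ne_nil hne
    refine ⟨(t.length : Int), ⟨by positivity, ?_⟩, ?_⟩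
    · rw [PySem.Str.len_eq]; omega
    · symm
      rw [String.ext_iff]
      have : (PySem.Str.slice cl (some (t.length : Int)) none).toList
          = cl.toList.drop t.length := by
        simp [PySem.List.slice_from _ (by positivity : (0:Int) ≤ (t.length : Int))]
      rw [this, ← ht, List.drop_left]

lemma pvGet_addSuffixes (sd : PySem.Dict String Int) (i : Int) (cl s : String) :
    (pvAddSuffixes sd i cl).get? s
      = match sd.get? s with
        | some v => some v
        | none => if pvQ s cl then some i else none := by
  unfold pvAddSuffixes
  rw [show (fun (d : PySem.Dict String Int) (k : Int) =>
        let s := PySem.Str.slice cl (some k) none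
        if d.contains s then d else d.insert s i)
      = (fun d k => if d.contains (PySem.Str.slice cl (some k) none) then d
                    else d.insert (PySem.Str.slice cl (some k) none) i) from rfl,
    pvGet_condFold]
  cases h : sd.get? s
  · simp only []
    by_cases hq : pvQ s cl = true
    · rw [if_pos (pvMem_sufKeys cl s |>.mpr hq), if_pos hq]
    · rw [if_neg (fun hm => hq ((pvMem_sufKeys cl s).mp hm)),
        if_neg (by simpa using hq)]
  · rfl

lemma pvCast_shift (o : Option Nat) (i0 : Int) :
    (o.map (fun i => i + 1)).map (fun k : Nat => i0 + Int.ofNat k)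
      = o.map (fun k : Nat => (i0 + 1) + Int.ofNat k) := by
  cases o <;> simp; omega

lemma pvBuild_full_get (cs : List String) (i0 : Int) (fd sd : PySem.Dict String Int) (s : String) :
    (((PySem.List.enumerate cs i0).foldl pvBuildStep (fd, sd)).1).get? s
      = match fd.get? s with
        | some v => some v
        | none => (List.findIdx? (fun c => PySem.Str.lower c == s) cs).map (fun k : Nat => i0 + Int.ofNat k) := by
  induction cs generalizing i0 fd sd with
  | nil =>
    simp only [PySem.List.enumerate_nil, List.foldl_nil, List.findIdx?_nil]
    cases h : fd.get? s <;> rfl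
  | cons c cs ih =>
    rw [PySem.List.enumerate_cons, List.foldl_cons, List.findIdx?_cons]
    by_cases hc : fd.contains (PySem.Str.lower c) = true
    · have hstep : pvBuildStep (fd, sd) (i0, c)
          = (fd, pvAddSuffixes sd i0 (PySem.Str.lower c)) := by
        simp [pvBuildStep, hc]
      rw [hstep, ih]
      by_cases hb : PySem.Str.lower c = s
      · have : (fd.get? s).isSome := by
          rw [← PySem.Dict.contains_eq_isSome_get?, ← hb]; exact hc
        obtain ⟨v, hv⟩ := Option.isSome_iff_exists.mp this
        rw [hv]
      · rw [if_neg (show ¬ (PySem.Str.lower c == s) = true by simpa using hb)]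
        cases h : fd.get? s
        · simp only []
          rw [pvCast_shift]
        · rfl
    · have hstep : pvBuildStep (fd, sd) (i0, c)
          = (fd.insert (PySem.Str.lower c) i0, pvAddSuffixes sd i0 (PySem.Str.lower c)) := by
        simp [pvBuildStep, hc]
      have hnone : fd.get? (PySem.Str.lower c) = none := by
        rw [← Option.not_isSome_iff_eq_none, ← PySem.Dict.contains_eq_isSome_get?]
        exact hc
      rw [hstep, ih]
      by_cases hb : PySem.Str.lower c = s
      · rw [hb] at hnone
        rw [hb, PySem.Dict.get?_insert_self, hnone, if_pos (show (s == s) = true by simp)]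
        simp
      · rw [PySem.Dict.get?_insert_of_ne _ i0 (fun h => hb h.symm),
            if_neg (show ¬ (PySem.Str.lower c == s) = true by simpa using hb)]
        cases h : fd.get? s
        · simp only []
          rw [pvCast_shift]
        · rfl

set_option maxHeartbeats 1000000 in
lemma pvBuild_suf_get (cs : List String) (i0 : Int) (fd sd : PySem.Dict String Int) (s : String) :
    (((PySem.List.enumerate cs i0).foldl pvBuildStep (fd, sd)).2).get? s
      = match sd.get? s with
        | some v => some v
        | none => (List.findIdx? (fun c => pvQ s (PySem.Str.lower c)) cs).map (fun k : Nat => i0 + Int.ofNat k) := by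
  induction cs generalizing i0 fd sd with
  | nil =>
    simp only [PySem.List.enumerate_nil, List.foldl_nil, List.findIdx?_nil]
    cases h : sd.get? s <;> rfl
  | cons c cs ih =>
    rw [PySem.List.enumerate_cons, List.foldl_cons, List.findIdx?_cons]
    have hstep : (pvBuildStep (fd, sd) (i0, c)).2 = pvAddSuffixes sd i0 (PySem.Str.lower c) := rfl
    have hfd : pvBuildStep (fd, sd) (i0, c)
        = ((pvBuildStep (fd, sd) (i0, c)).1, pvAddSuffixes sd i0 (PySem.Str.lower c)) := by
      rw [← hstep]
    rw [hfd, ih, pvGet_addSuffixes]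
    by_cases hq : pvQ s (PySem.Str.lower c) = true
    · rw [if_pos hq]
      cases h : sd.get? s
      · simp only [if_pos hq]
        simp
      · rfl
    · rw [if_neg (by simpa using hq)]
      cases h : sd.get? s
      · simp only [if_neg (by simpa using hq : ¬ pvQ s (PySem.Str.lower c) = true)]
        rw [pvCast_shift]
      · rfl

lemma pvOmin_findIdx (p q : String → Bool) (cs : List String) (i0 : Int) :
    pvOmin ((List.findIdx? p cs).map (fun k : Nat => i0 + Int.ofNat k))
           ((List.findIdx? q cs).map (fun k : Nat => i0 + Int.ofNat k))
      = (List.findIdx? (fun c => p c || q c) cs).map (fun k : Nat => i0 + Int.ofNat k) := by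
  induction cs generalizing i0 with
  | nil => rfl
  | cons c cs ih =>
    rw [List.findIdx?_cons, List.findIdx?_cons, List.findIdx?_cons]
    cases hp : p c <;> cases hq : q c <;>
      simp only [Bool.true_or, Bool.false_or, Bool.or_false, if_true, if_false,
        Bool.false_eq_true]
    · rw [pvCast_shift, pvCast_shift, pvCast_shift, ih]
    · cases h : List.findIdx? p cs
      · simp [pvOmin]
      · simp only [Option.map_some]
        simp only [pvOmin]
        congr 1
        split_ifs with hlt
        · rfl
        · exfalso
          simp only [Int.ofNat_eq_natCast] at hlt
          omega
    · cases h : List.findIdx? q cs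
      · simp [pvOmin]
      · simp only [Option.map_some]
        simp only [pvOmin]
        congr 1
        split_ifs with hlt
        · exfalso
          simp only [Int.ofNat_eq_natCast] at hlt
          omega
        · rfl
    · simp [pvOmin]

lemma pvOmin_findIdx0 (p q : String → Bool) (cs : List String) :
    pvOmin ((List.findIdx? p cs).map (fun k : Nat => Int.ofNat k))
           ((List.findIdx? q cs).map (fun k : Nat => Int.ofNat k))
      = (List.findIdx? (fun c => p c || q c) cs).map (fun k : Nat => Int.ofNat k) := by
  have h := pvOmin_findIdx p q cs 0
  simpa [zero_add] using h

lemma pvFold_omin (ks : List Int) (g : Int → String → Bool) (P : String → Bool)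
    (cs : List String) (F : Int → Option Int)
    (hF : ∀ k ∈ ks, F k = (List.findIdx? (g k) cs).map (fun n : Nat => Int.ofNat n)) :
    ks.foldl (fun best k => pvOmin best (F k))
        ((List.findIdx? P cs).map (fun n : Nat => Int.ofNat n))
      = (List.findIdx? (fun c => P c || ks.any (fun k => g k c)) cs).map (fun n : Nat => Int.ofNat n) := by
  induction ks generalizing P with
  | nil =>
    simp only [List.foldl_nil, List.any_nil, Bool.or_false]
  | cons k ks ih =>
    rw [List.foldl_cons, hF k (List.mem_cons_self), pvOmin_findIdx0]
    rw [ih (fun c => P c || g k c) (fun k' hk' => hF k' (List.mem_cons_of_mem _ hk'))]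
    have hpred : (fun c => (P c || g k c) || ks.any (fun k' => g k' c))
        = (fun c => P c || (k :: ks).any (fun k' => g k' c)) := by
      funext c
      simp [List.any_cons, Bool.or_assoc]
    rw [hpred]

lemma pvMatchA_iff_pos (c r : String)
    (hm : 0 < min c.toList.length r.toList.length) :
    pvMatchA c r = true ↔
      (c.toList.map PySem.Chars.lowerChar).drop
          (c.toList.length - min c.toList.length r.toList.length)
        = (r.toList.map PySem.Chars.lowerChar).drop
          (r.toList.length - min c.toList.length r.toList.length) := by
  have harg : -1 * min (PySem.Str.len c) (PySem.Str.len r)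
      = -((min c.toList.length r.toList.length : Nat) : Int) := by
    rw [PySem.Str.len_eq, PySem.Str.len_eq]
    push_cast
    ring
  unfold pvMatchA
  rw [harg, beq_iff_eq, String.ext_iff, PySem.Str.toList_lower, PySem.Str.toList_lower,
    PySem.Str.toList_slice, PySem.Str.toList_slice,
    PySem.Chars.slice_eq_listSlice, PySem.Chars.slice_eq_listSlice,
    PySem.List.slice_from_neg_natCast _ _ hm, PySem.List.slice_from_neg_natCast _ _ hm]
  unfold PySem.Chars.lower
  rw [List.map_drop, List.map_drop]

lemma pvMatchA_iff_zero (c r : String)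
    (hm : min c.toList.length r.toList.length = 0) :
    pvMatchA c r = (PySem.Str.lower c == PySem.Str.lower r) := by
  have harg : -1 * min (PySem.Str.len c) (PySem.Str.len r) = (0 : Int) := by
    rw [PySem.Str.len_eq, PySem.Str.len_eq]
    omega
  unfold pvMatchA
  rw [harg]
  have hsc : PySem.Str.slice c (some 0) none = c := by
    rw [String.ext_iff, PySem.Str.toList_slice, PySem.Chars.slice_eq_listSlice,
      PySem.List.slice_from _ le_rfl]
    simp
  have hsr : PySem.Str.slice r (some 0) none = r := by
    rw [String.ext_iff, PySem.Str.toList_slice, PySem.Chars.slice_eq_listSlice,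
      PySem.List.slice_from _ le_rfl]
    simp
  rw [hsc, hsr]

def pvLowL (s : String) : List Char := s.toList.map PySem.Chars.lowerChar

lemma pvToList_lower' (s : String) : (PySem.Str.lower s).toList = pvLowL s := by
  rw [PySem.Str.toList_lower]
  unfold PySem.Chars.lower pvLowL
  rfl

lemma pvLen_lower (s : String) : PySem.Str.len (PySem.Str.lower s) = (s.toList.length : Int) := by
  rw [PySem.Str.len_eq, pvToList_lower']
  unfold pvLowL
  rw [List.length_map]

lemma pvLower_empty_iff (s : String) : PySem.Str.lower s = "" ↔ s.toList = [] := by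
  rw [String.ext_iff, pvToList_lower']
  unfold pvLowL
  constructor
  · intro h
    simpa using h
  · intro h
    simp [h]

lemma pvMatchA_empty (c r : String) (h : PySem.Str.lower r = "") :
    pvMatchA c r = (PySem.Str.lower c == "") := by
  have hr : r.toList = [] := (pvLower_empty_iff r).mp h
  have hm : min c.toList.length r.toList.length = 0 := by
    rw [hr]; simp
  rw [pvMatchA_iff_zero c r hm, h]

lemma pvSliceLower_eq (c r : String) (k : Int) (hk : 0 ≤ k) :
    (PySem.Str.lower c == PySem.Str.slice (PySem.Str.lower r) (some k) none) = true
      ↔ pvLowL c = (pvLowL r).drop k.toNat := by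
  rw [beq_iff_eq, String.ext_iff, pvToList_lower', PySem.Str.toList_slice,
    PySem.Chars.slice_eq_listSlice, PySem.List.slice_from _ hk, pvToList_lower']

lemma pvMatchA_eq (c r : String) (h : PySem.Str.lower r ≠ "") :
    pvMatchA c r
      = (pvQ (PySem.Str.lower r) (PySem.Str.lower c)
         || (PySem.List.pyRange 0 (PySem.Str.len (PySem.Str.lower r)) 1).any
              (fun k => PySem.Str.lower c == PySem.Str.slice (PySem.Str.lower r) (some k) none)) := by
  have hr : r.toList ≠ [] := fun hh => h ((pvLower_empty_iff r).mpr hh)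
  have hL2 : 0 < r.toList.length := List.length_pos_of_ne_nil hr
  have hlenc : (pvLowL c).length = c.toList.length := by unfold pvLowL; rw [List.length_map]
  have hlenr : (pvLowL r).length = r.toList.length := by unfold pvLowL; rw [List.length_map]
  rw [Bool.eq_iff_iff]
  -- rewrite the RHS into a Prop over lists
  have hRHS : (pvQ (PySem.Str.lower r) (PySem.Str.lower c)
         || (PySem.List.pyRange 0 (PySem.Str.len (PySem.Str.lower r)) 1).any
              (fun k => PySem.Str.lower c == PySem.Str.slice (PySem.Str.lower r) (some k) none)) = true
      ↔ ((pvLowL r ≠ [] ∧ pvLowL r <:+ pvLowL c)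
         ∨ ∃ k : Int, (0 ≤ k ∧ k < (r.toList.length : Int)) ∧ pvLowL c = (pvLowL r).drop k.toNat) := by
    rw [Bool.or_eq_true, List.any_eq_true]
    constructor
    · rintro (hq | ⟨k, hk, hb⟩)
      · left
        unfold pvQ at hq
        rw [decide_eq_true_eq] at hq
        rw [pvToList_lower', pvToList_lower'] at hq
        exact hq
      · right
        rw [PySem.List.mem_pyRange_one, pvLen_lower] at hk
        exact ⟨k, hk, (pvSliceLower_eq c r k hk.1).mp hb⟩
    · rintro (hq | ⟨k, hk, hb⟩)
      · left
        unfold pvQ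
        rw [decide_eq_true_eq, pvToList_lower', pvToList_lower']
        exact hq
      · right
        refine ⟨k, ?_, (pvSliceLower_eq c r k hk.1).mpr hb⟩
        rw [PySem.List.mem_pyRange_one, pvLen_lower]
        exact hk
  rw [hRHS]
  by_cases hm : 0 < min c.toList.length r.toList.length
  · rw [pvMatchA_iff_pos c r hm]
    have hL1 : 0 < c.toList.length := by omega
    show (pvLowL c).drop _ = (pvLowL r).drop _ ↔ _
    by_cases hle : c.toList.length ≤ r.toList.length
    · rw [min_eq_left hle]
      rw [Nat.sub_self, List.drop_zero]
      constructor
      · intro heq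
        right
        refine ⟨((r.toList.length - c.toList.length : Nat) : Int), ⟨by positivity, by omega⟩, ?_⟩
        rw [Int.toNat_natCast]
        exact heq
      · rintro (⟨hne, hsuf⟩ | ⟨k, ⟨hk0, hk2⟩, heq⟩)
        · have hlen : (pvLowL r).length ≤ (pvLowL c).length := hsuf.length_le
          have : c.toList.length = r.toList.length := by omega
          have := List.IsSuffix.eq_of_length hsuf (by omega)
          rw [this]
          rw [show r.toList.length - c.toList.length = 0 by omega, List.drop_zero]
        · have hlen : (pvLowL c).length = (pvLowL r).length - k.toNat := by
            rw [heq, List.length_drop]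
          rw [heq]
          congr 1
          omega
    · rw [min_eq_right (Nat.le_of_not_le hle)]
      rw [Nat.sub_self, List.drop_zero]
      constructor
      · intro heq
        left
        have hlrne : pvLowL r ≠ [] := by
          intro hh
          have := congrArg List.length hh
          rw [hlenr, List.length_nil] at this
          omega
        refine ⟨hlrne, ?_⟩
        rw [← heq]
        exact List.drop_suffix _ _
      · rintro (⟨hne, hsuf⟩ | ⟨k, ⟨hk0, hk2⟩, heq⟩)
        · obtain ⟨t, ht⟩ := hsuf
          have htlen : t.length = c.toList.length - r.toList.length := by
            have := congrArg List.length ht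
            simp at this
            omega
          rw [← ht, ← htlen, List.drop_left]
        · exfalso
          have : (pvLowL c).length = (pvLowL r).length - k.toNat := by
            rw [heq, List.length_drop]
          omega
  · have hmz : min c.toList.length r.toList.length = 0 := by omega
    have hL1 : c.toList.length = 0 := by omega
    have hcnil : pvLowL c = [] := by
      rw [← List.length_eq_zero_iff, hlenc]; exact hL1
    rw [pvMatchA_iff_zero c r hmz]
    constructor
    · intro hb
      exfalso
      rw [beq_iff_eq, String.ext_iff, pvToList_lower', pvToList_lower'] at hb
      have := congrArg List.length hb
      rw [hlenc, hlenr] at this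
      omega
    · rintro (⟨hne, hsuf⟩ | ⟨k, ⟨hk0, hk2⟩, heq⟩)
      · exfalso
        have hlen2 := hsuf.length_le
        rw [hcnil, hlenr] at hlen2
        simp only [List.length_nil, Nat.le_zero] at hlen2
        omega
      · exfalso
        have := congrArg List.length heq
        rw [hlenc, List.length_drop, hlenr] at this
        omega

lemma pvFindIdx_lt (p : String → Bool) (l : List String) (k : Nat) (h : List.findIdx? p l = some k) : k < l.length := by
  induction l generalizing k with
  | nil => simp at h
  | cons a t ih =>
    rw [List.findIdx?_cons] at h
    by_cases hp : p a = true
    · rw [if_pos hp] at h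
      obtain rfl : (0 : Nat) = k := by simpa using h
      simp
    · rw [if_neg hp] at h
      cases ht : List.findIdx? p t with
      | none => rw [ht] at h; simp at h
      | some m =>
        rw [ht] at h
        obtain rfl : m + 1 = k := by simpa using h
        have hm := ih m ht
        simp only [List.length_cons]
        omega

lemma pvFindA_eq (cs : List String) (r : String) :
    pvFindA cs r = (List.findIdx? (fun c => pvMatchA c r) cs).bind (fun k => cs[k]?) := by
  induction cs with
  | nil => rfl
  | cons c cs ih =>
    rw [List.findIdx?_cons]
    by_cases hp : pvMatchA c r = true
    · rw [if_pos hp]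
      unfold pvFindA
      rw [if_pos hp]
      rfl
    · rw [if_neg hp]
      unfold pvFindA
      rw [if_neg hp, ih]
      cases h : List.findIdx? (fun c => pvMatchA c r) cs <;> rfl

lemma pvMap_zero_ofNat (o : Option Nat) :
    o.map (fun k : Nat => (0 : Int) + Int.ofNat k) = o.map (fun k : Nat => Int.ofNat k) := by
  cases o <;> simp

lemma pvBuild_full (cs : List String) (s : String) :
    (pvBuild cs).1.get? s
      = (List.findIdx? (fun c => PySem.Str.lower c == s) cs).map (fun k : Nat => Int.ofNat k) := by
  unfold pvBuild
  rw [pvBuild_full_get, PySem.Dict.get?_empty, pvMap_zero_ofNat]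

lemma pvBuild_suf (cs : List String) (s : String) :
    (pvBuild cs).2.get? s
      = (List.findIdx? (fun c => pvQ s (PySem.Str.lower c)) cs).map (fun k : Nat => Int.ofNat k) := by
  unfold pvBuild
  rw [pvBuild_suf_get, PySem.Dict.get?_empty, pvMap_zero_ofNat]

lemma pvBest_eq (cs : List String) (r : String) :
    pvBest (pvBuild cs).1 (pvBuild cs).2 r
      = (List.findIdx? (fun c => pvMatchA c r) cs).map (fun k : Nat => Int.ofNat k) := by
  have hfull := pvBuild_full cs
  have hsuf := pvBuild_suf cs
  revert hfull hsuf
  generalize (pvBuild cs).1 = fd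
  generalize (pvBuild cs).2 = sd
  intro hfull hsuf
  simp only [pvBest]
  by_cases hrl : PySem.Str.lower r = ""
  · rw [if_pos (beq_iff_eq.mpr hrl), hfull,
      show (fun c => pvMatchA c r) = (fun c => PySem.Str.lower c == "") from
        funext fun c => pvMatchA_empty c r hrl]
  · rw [if_neg (by simpa using hrl), hsuf,
      pvFold_omin _ (fun k c => PySem.Str.lower c == PySem.Str.slice (PySem.Str.lower r) (some k) none)
        _ cs _ (fun k _ => hfull _),
      show (fun c => pvMatchA c r)
          = (fun c => pvQ (PySem.Str.lower r) (PySem.Str.lower c)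
             || (PySem.List.pyRange 0 (PySem.Str.len (PySem.Str.lower r)) 1).any
                  (fun k => PySem.Str.lower c == PySem.Str.slice (PySem.Str.lower r) (some k) none)) from
        funext fun c => pvMatchA_eq c r hrl]

set_option maxHeartbeats 2000000 in
theorem map_chromnames_eq (cs rs : List String) :
    map_chromnames cs rs = map_chromnames_alt cs rs := by
  unfold map_chromnames map_chromnames_alt
  have hstep : (fun (a : List (String × String)) (r : String) =>
      match pvFindA cs r with
      | some c => a ++ [(c, r)]
      | none => a)
    = (fun (a : List (String × String)) (r : String) =>
      match pvBest (pvBuild cs).1 (pvBuild cs).2 r with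
      | some b => a ++ [(PySem.List.pyGetD cs b "", r)]
      | none => a) := by
    funext a r
    rw [pvFindA_eq, pvBest_eq]
    cases h : List.findIdx? (fun c => pvMatchA c r) cs with
    | none => rfl
    | some k =>
      have hk : k < cs.length := pvFindIdx_lt _ _ _ h
      simp only [Option.map_some, Option.bind_some]
      rw [List.getElem?_eq_getElem hk]
      have : PySem.List.pyGetD cs (Int.ofNat k) "" = cs[k] := by
        rw [Int.ofNat_eq_natCast, PySem.List.pyGetD_natCast, List.getD_eq_getElem cs "" hk]
      rw [this]
  rw [hstep]

-- ===== VERDICT (by name: the statement is the Claim_ definition above) =====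
theorem map_chromnames_spec : Claim_equal_map_chromnames := by
  intro chromnames ref_chromnames _hdom
  unfold Spec_map_chromnames
  exact map_chromnames_eq chromnames ref_chromnames
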